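-- pv_equiv track=rewrite | github.com/goutam-kul/puresoft-lt-agent-sub | src/llm_handler/actions.py | set_current_level
-- ===== SOURCE A (Python) =====
-- from typing import List, Dict, Any
--
-- levels = ['beginner', 'intermediate', 'advanced']
--
-- def set_current_level(context: str) -> Dict[str, Any]:
--     """Get the current level of understanding of user from user's reply"""
--
--     text = context.lower().split()
--     for level in text:
--         if level in levels:
--             current_level = level
--     return {
--         "response": f"Great! I'll create a {current_level} level exercise for you."
--     }
-- ===== SOURCE B (Python) =====
-- levels = ['beginner', 'intermediate', 'advanced']
--
-- def set_current_level(context: str):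
--     """Get the current level of understanding of user from user's reply"""
--     words = context.lower().split()
--     rev = list(reversed(words))
--     best_pos = -1
--     for lvl in levels:
--         if lvl in rev:
--             pos = len(words) - 1 - rev.index(lvl)
--             if pos > best_pos:
--                 best_pos = pos
--                 current_level = lvl
--     return {
--         "response": f"Great! I'll create a {current_level} level exercise for you."
--     }
-- ===== Notes on version B (the rewrite author's own statement) =====
-- stated objective: alternative
-- what changed: B inverts the traversal: instead of A's words-major scan that tests each word against levels and overwrites a variable, B loops over the three levels, computes each level's last position in the word list via a reversed index search, and returns the level with the maximal position (argmax).
import Mathlib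
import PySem

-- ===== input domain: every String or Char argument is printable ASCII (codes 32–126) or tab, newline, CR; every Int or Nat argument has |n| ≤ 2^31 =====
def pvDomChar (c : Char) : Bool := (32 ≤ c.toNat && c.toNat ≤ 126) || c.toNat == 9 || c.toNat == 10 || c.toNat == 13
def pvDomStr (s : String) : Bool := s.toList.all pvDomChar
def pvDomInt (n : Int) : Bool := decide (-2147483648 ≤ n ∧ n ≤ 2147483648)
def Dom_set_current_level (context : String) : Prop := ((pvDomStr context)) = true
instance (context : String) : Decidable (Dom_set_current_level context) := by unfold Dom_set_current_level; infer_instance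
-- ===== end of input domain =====

-- B inverts the traversal: it loops over the three level names, finds each one's last
-- position in the word list via a reversed index search, and keeps the argmax, instead of
-- A's forward scan over the words that overwrites current_level (alternative algorithm).


def levels : List String := ["beginner", "intermediate", "advanced"]

def pvMsg (l : String) : List (String × String) :=
  [("response", "Great! I'll create a " ++ l ++ " level exercise for you.")]

-- ===== PORT A =====
-- forward scan over the words; every match overwrites current_level; 'none' at the end
-- = Python's NameError (outside Pre_)
def set_current_level (context : String) : List (String × String) :=
  let text := PySem.Str.split₀ (PySem.Str.lower context)
  match text.foldl (fun acc level => if levels.contains level then some level else acc) none with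
  | some l => pvMsg l
  | none => []

-- ===== PORT B =====
-- one iteration of B's loop over `levels`: if lvl occurs, its last position in the words
-- is n - 1 - rev.index(lvl); keep it if it beats the best so far
def lvlStep (n : Int) (rev : List String) (st : Int × Option String) (lvl : String) :
    Int × Option String :=
  if rev.contains lvl then
    match PySem.List.index? rev lvl with
    | some idx => if n - 1 - (idx : Int) > st.1 then (n - 1 - (idx : Int), some lvl) else st
    | none => st
  else st

-- levels-major argmax of last positions; 'none' = Python's NameError (outside Pre_)
def set_current_level_alt (context : String) : List (String × String) :=
  let words := PySem.Str.split₀ (PySem.Str.lower context)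
  let rev := words.reverse
  let st := levels.foldl (lvlStep (words.length : Int) rev) (-1, none)
  match st.2 with
  | some l => pvMsg l
  | none => []

-- ===== PRECONDITION & SPEC =====
-- Pre_ excludes exactly the contexts containing no level word, on which A (and B) raise NameError.
def Pre_set_current_level (context : String) : Prop :=
  (PySem.Str.split₀ (PySem.Str.lower context)).any (fun w => levels.contains w) = true
instance (context : String) : Decidable (Pre_set_current_level context) := by
  unfold Pre_set_current_level; infer_instance

def pvWitness_set_current_level : String := "I want an advanced one"

def Spec_set_current_level (context : String) (out : List (String × String)) : Prop := out = set_current_level_alt context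
instance (context : String) (out : List (String × String)) : Decidable (Spec_set_current_level context out) := by unfold Spec_set_current_level; infer_instance

-- ===== CLAIM (what is proved, stated in full; the proofs are below) =====
def Claim_equal_set_current_level : Prop := ∀ (context : String), Dom_set_current_level context → Pre_set_current_level context → Spec_set_current_level context (set_current_level context)

-- ===== LEMMAS AND PROOFS =====

-- A's last-match fold = first match of the reversed list
theorem lastMatch_eq_find_reverse (p : String → Bool) (ws : List String) (init : Option String) :
    ws.foldl (fun acc w => if p w then some w else acc) init
      = (ws.reverse.find? p).or init := by
  induction ws generalizing init with
  | nil => simp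
  | cons a ws ih =>
    simp only [List.foldl_cons, List.reverse_cons, List.find?_append, ih]
    cases h : p a <;> simp [List.find?, h]

theorem lvlStep_keep (n : Int) (rev : List String) (st : Int × Option String) (lvl : String)
    (h : ∀ k : Nat, PySem.List.index? rev lvl = some k → ¬ (n - 1 - (k : Int) > st.1)) :
    lvlStep n rev st lvl = st := by
  simp only [PySem.List.index?_eq_idxOf?] at h
  unfold lvlStep
  by_cases hmem : lvl ∈ rev
  · cases hidx : List.idxOf? lvl rev with
    | none => simp [hmem, PySem.List.index?_eq_idxOf?, hidx]
    | some k =>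
      have := h k hidx
      simp only [gt_iff_lt] at this
      simp [hmem, PySem.List.index?_eq_idxOf?, hidx, this]
  · simp [hmem]

theorem lvlStep_hit (n : Int) (rev : List String) (st : Int × Option String) (lvl : String)
    (k : Nat) (hidx : PySem.List.index? rev lvl = some k) (hgt : n - 1 - (k : Int) > st.1) :
    lvlStep n rev st lvl = (n - 1 - (k : Int), some lvl) := by
  have hmem : lvl ∈ rev := (PySem.List.index?_isSome_iff rev lvl).mp (by rw [hidx]; rfl)
  simp only [PySem.List.index?_eq_idxOf?] at hidx
  simp [lvlStep, hmem, PySem.List.index?_eq_idxOf?, hidx, hgt]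

theorem lvlStep_fst_le (n : Int) (rev : List String) (st : Int × Option String) (lvl : String)
    (m : Int) (h1 : st.1 ≤ m)
    (h2 : ∀ k : Nat, PySem.List.index? rev lvl = some k → n - 1 - (k : Int) ≤ m) :
    (lvlStep n rev st lvl).1 ≤ m := by
  simp only [PySem.List.index?_eq_idxOf?] at h2
  unfold lvlStep
  by_cases hmem : lvl ∈ rev
  · cases hidx : List.idxOf? lvl rev with
    | none => simpa [hmem, PySem.List.index?_eq_idxOf?, hidx]
    | some k =>
      by_cases hgt : st.1 < n - 1 - (k : Int)
      · simpa [hmem, PySem.List.index?_eq_idxOf?, hidx, hgt] using h2 k hidx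
      · simpa [hmem, PySem.List.index?_eq_idxOf?, hidx, hgt]
  · simpa [hmem]

-- when the head word is not a level word, every step over the extended list agrees with
-- the step over the tail (positions are preserved)
theorem lvlStep_cons_skip (a : String) (tl : List String) (st : Int × Option String)
    (lvl : String) (hne : a ≠ lvl) :
    lvlStep ((tl.length : Int) + 1) (a :: tl) st lvl = lvlStep (tl.length : Int) tl st lvl := by
  unfold lvlStep
  have hrw : PySem.List.index? (a :: tl) lvl = (PySem.List.index? tl lvl).map (· + 1) :=
    PySem.List.index?_cons_of_ne tl hne
  cases hidx : PySem.List.index? tl lvl with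
  | none =>
    have hmem : lvl ∉ tl := (PySem.List.index?_eq_none_iff tl lvl).mp hidx
    have hmem2 : lvl ∉ a :: tl := by simp [hne.symm, hmem]
    simp [hmem, hmem2]
  | some k =>
    have hmem : lvl ∈ tl := (PySem.List.index?_isSome_iff tl lvl).mp (by rw [hidx]; rfl)
    have hmem2 : lvl ∈ a :: tl := List.mem_cons_of_mem a hmem
    rw [hidx] at hrw
    have hidx2 : List.idxOf? lvl (a :: tl) = some (k + 1) := by
      rw [← PySem.List.index?_eq_idxOf?, hrw]; rfl
    have e : (tl.length : Int) - ((k : Int) + 1) = (tl.length : Int) - 1 - (k : Int) := by ring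
    simp [hmem, hmem2, PySem.List.index?_eq_idxOf?, hidx2, e]

-- core: B's argmax over levels returns the first level word of the reversed word list
theorem argmax_eq_find (ws : List String) :
    (levels.foldl (lvlStep (ws.length : Int) ws) (-1, none)).2
      = ws.find? (fun w => levels.contains w) := by
  induction ws with
  | nil => simp [levels, List.foldl, lvlStep]
  | cons a tl ih =>
    simp only [levels, List.foldl, List.length_cons, Nat.cast_add, Nat.cast_one] at ih ⊢
    by_cases hb : a = "beginner"
    · subst hb
      rw [lvlStep_hit ((tl.length : Int) + 1) ("beginner" :: tl) (-1, none) "beginner" 0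
            (PySem.List.index?_cons_self _ _) (by push_cast; omega),
          lvlStep_keep _ _ _ "intermediate" (by intro k hk; push_cast; omega),
          lvlStep_keep _ _ _ "advanced" (by intro k hk; push_cast; omega)]
      simp [List.find?]
    · by_cases hi : a = "intermediate"
      · subst hi
        have hs1 : (lvlStep ((tl.length : Int) + 1) ("intermediate" :: tl) (-1, none) "beginner").1
            ≤ (tl.length : Int) - 1 := by
          refine lvlStep_fst_le _ _ _ _ _ (by simp; omega) (fun k hk => ?_)
          rw [PySem.List.index?_cons_of_ne tl (by decide)] at hk
          cases hidx : PySem.List.index? tl "beginner" with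
          | none => rw [hidx] at hk; simp at hk
          | some k' =>
            rw [hidx] at hk
            simp only [Option.map_some, Option.some.injEq] at hk
            subst hk; push_cast; omega
        rw [lvlStep_hit ((tl.length : Int) + 1) ("intermediate" :: tl) _ "intermediate" 0
              (PySem.List.index?_cons_self _ _) (by push_cast; omega),
            lvlStep_keep _ _ _ "advanced" (by intro k hk; push_cast; omega)]
        simp [List.find?]
      · by_cases ha : a = "advanced"
        · subst ha
          have hb1 : ∀ (st : Int × Option String) lvl, "advanced" ≠ lvl →
              st.1 ≤ (tl.length : Int) - 1 →
              (lvlStep ((tl.length : Int) + 1) ("advanced" :: tl) st lvl).1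
                ≤ (tl.length : Int) - 1 := by
            intro st lvl hne hst
            refine lvlStep_fst_le _ _ _ _ _ hst (fun k hk => ?_)
            rw [PySem.List.index?_cons_of_ne tl hne] at hk
            cases hidx : PySem.List.index? tl lvl with
            | none => rw [hidx] at hk; simp at hk
            | some k' =>
              rw [hidx] at hk
              simp only [Option.map_some, Option.some.injEq] at hk
              subst hk; push_cast; omega
          have hs1 : (lvlStep ((tl.length : Int) + 1) ("advanced" :: tl) (-1, none) "beginner").1
              ≤ (tl.length : Int) - 1 := hb1 _ _ (by decide) (by simp; omega)
          have hs2 : (lvlStep ((tl.length : Int) + 1) ("advanced" :: tl)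
              (lvlStep ((tl.length : Int) + 1) ("advanced" :: tl) (-1, none) "beginner")
              "intermediate").1 ≤ (tl.length : Int) - 1 := hb1 _ _ (by decide) hs1
          rw [lvlStep_hit ((tl.length : Int) + 1) ("advanced" :: tl) _ "advanced" 0
                (PySem.List.index?_cons_self _ _) (by push_cast; omega)]
          simp [List.find?]
        · rw [lvlStep_cons_skip a tl _ "beginner" hb,
              lvlStep_cons_skip a tl _ "intermediate" hi,
              lvlStep_cons_skip a tl _ "advanced" ha, ih]
          simp [List.find?, hb, hi, ha]

theorem set_current_level_spec : Claim_equal_set_current_level := by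
  intro context _ _
  unfold Spec_set_current_level set_current_level set_current_level_alt
  simp only [lastMatch_eq_find_reverse, Option.or_none]
  rw [show ((PySem.Str.split₀ (PySem.Str.lower context)).length : Int)
      = (((PySem.Str.split₀ (PySem.Str.lower context)).reverse).length : Int) by simp,
    argmax_eq_find]

-- ===== VERDICT (by name: the statement is the Claim_ definition above) =====
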